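-- pv_equiv track=rewrite | github.com/realmistic/advent_of_code_2021 | solutions/day19_other.py | cross_prod
-- ===== SOURCE A (Python) =====
-- def cross_prod(v1, v2, third_axis):
--     # Construct vector matrix
--     a = [0, 0, 0]
--     b = [0, 0, 0]
--     a['xyz'.index(v1[-1])] = 1
--     if v1[0] == '-': a['xyz'.index(v1[-1])] *= -1
--     b['xyz'.index(v2[-1])] = 1
--     if v2[0] == '-': b['xyz'.index(v2[-1])] *= -1
--     mat = [a, b]
--     # Cross Product
--     c = [0, 0, 0]
--     for i in range(3):
--         cs = list({0, 1, 2} - {i})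
--         x, y = min(cs), max(cs)
--         c[i] = mat[0][x] * mat[1][y] - mat[0][y] * mat[1][x]
--     c[1] *= -1
--     # Figure out sign for third axis
--     third_side_sign = ''
--     if c['xyz'.index(third_axis)] < 0:
--         third_side_sign = '-'
--     # Return the third side
--     return third_side_sign + third_axis
-- ===== SOURCE B (Python) =====
-- def cross_prod(v1, v2, third_axis):
--     # Closed-form Levi-Civita parity instead of building vectors and looping.
--     i = 'xyz'.index(v1[-1])
--     j = 'xyz'.index(v2[-1])
--     k = 'xyz'.index(third_axis)
--     sign = (-1 if v1[0] == '-' else 1) * (-1 if v2[0] == '-' else 1)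
--     eps = (j - i) * (k - j) * (k - i)
--     return ('-' if sign * eps < 0 else '') + third_axis
-- ===== Notes on version B (the rewrite author's own statement) =====
-- stated objective: simpler
-- what changed: Replaces building two 3-vectors, a full cross-product loop over set differences with min/max, and an indexed lookup, by a closed-form Levi-Civita parity computed directly from the two axis indices and signs.
import Mathlib
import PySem

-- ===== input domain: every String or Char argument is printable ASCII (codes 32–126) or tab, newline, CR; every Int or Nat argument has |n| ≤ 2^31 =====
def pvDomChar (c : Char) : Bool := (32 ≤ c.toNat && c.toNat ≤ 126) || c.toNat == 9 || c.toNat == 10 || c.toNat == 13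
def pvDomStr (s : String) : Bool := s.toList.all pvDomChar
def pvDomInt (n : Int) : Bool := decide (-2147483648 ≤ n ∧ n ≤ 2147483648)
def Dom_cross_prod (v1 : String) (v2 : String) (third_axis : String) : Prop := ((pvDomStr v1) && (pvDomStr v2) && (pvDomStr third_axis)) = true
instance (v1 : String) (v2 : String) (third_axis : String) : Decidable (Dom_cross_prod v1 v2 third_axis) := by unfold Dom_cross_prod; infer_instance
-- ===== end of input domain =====

-- B replaces A's vector-building and cross-product loop by a closed-form Levi-Civita
-- parity on the parsed axis indices and signs; objective: simpler.


-- shared parsing helper: 'xyz'.index(c) for a one-character string c (both Pythons make this exact call)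
def idxXyz (c : Char) : Int := PySem.Chars.find ['x', 'y', 'z'] [c]

-- ===== PORT A =====
def cross_prod (v1 : String) (v2 : String) (third_axis : String) : String :=
  -- Construct vector matrix
  let a : List Int := [0, 0, 0]
  let b : List Int := [0, 0, 0]
  let i1 : Int := idxXyz ((PySem.Str.pyGet? v1 (-1)).getD ' ')
  let a := PySem.List.pySetD a i1 1
  let a := if (PySem.Str.pyGet? v1 0).getD ' ' == '-' then
             PySem.List.pySetD a i1 (PySem.List.pyGetD a i1 0 * (-1)) else a
  let i2 : Int := idxXyz ((PySem.Str.pyGet? v2 (-1)).getD ' ')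
  let b := PySem.List.pySetD b i2 1
  let b := if (PySem.Str.pyGet? v2 0).getD ' ' == '-' then
             PySem.List.pySetD b i2 (PySem.List.pyGetD b i2 0 * (-1)) else b
  let mat : List (List Int) := [a, b]
  -- Cross Product
  let c : List Int := [0, 0, 0]
  let c := (PySem.List.pyRange 0 3 1).foldl (fun c i =>
    let cs : List Int := PySem.Set.diff (PySem.Set.ofList [(0 : Int), 1, 2]) (PySem.Set.ofList [i])
    let x := (PySem.List.min? cs (fun t => t)).getD 0
    let y := (PySem.List.max? cs (fun t => t)).getD 0
    PySem.List.pySetD c i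
      (PySem.List.pyGetD (PySem.List.pyGetD mat 0 []) x 0 * PySem.List.pyGetD (PySem.List.pyGetD mat 1 []) y 0
       - PySem.List.pyGetD (PySem.List.pyGetD mat 0 []) y 0 * PySem.List.pyGetD (PySem.List.pyGetD mat 1 []) x 0)) c
  let c := PySem.List.pySetD c 1 (PySem.List.pyGetD c 1 0 * (-1))
  -- Figure out sign for third axis
  let third_side_sign := if PySem.List.pyGetD c (PySem.Str.find "xyz" third_axis) 0 < 0 then "-" else ""
  third_side_sign ++ third_axis

-- ===== PORT B =====
def cross_prod_alt (v1 : String) (v2 : String) (third_axis : String) : String :=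
  let i := idxXyz ((PySem.Str.pyGet? v1 (-1)).getD ' ')
  let j := idxXyz ((PySem.Str.pyGet? v2 (-1)).getD ' ')
  let k := PySem.Str.find "xyz" third_axis
  let sign : Int := (if (PySem.Str.pyGet? v1 0).getD ' ' == '-' then -1 else 1)
                  * (if (PySem.Str.pyGet? v2 0).getD ' ' == '-' then -1 else 1)
  let eps := (j - i) * (k - j) * (k - i)
  (if sign * eps < 0 then "-" else "") ++ third_axis

-- ===== PRECONDITION & SPEC =====
-- Pre_ excludes exactly the inputs where the Python raises: v1/v2 empty or with a last
-- character outside 'xyz' ('xyz'.index ValueError / IndexError), and a third_axis that is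
-- not a substring of 'xyz' (ValueError).
def Pre_cross_prod (v1 : String) (v2 : String) (third_axis : String) : Prop :=
  (PySem.Str.pyGet? v1 (-1)).getD ' ' ∈ (['x', 'y', 'z'] : List Char) ∧
  (PySem.Str.pyGet? v2 (-1)).getD ' ' ∈ (['x', 'y', 'z'] : List Char) ∧
  PySem.Str.find "xyz" third_axis ≠ -1
instance (v1 : String) (v2 : String) (third_axis : String) : Decidable (Pre_cross_prod v1 v2 third_axis) := by unfold Pre_cross_prod; infer_instance

def pvWitness_cross_prod : String × String × String := ("-x", "y", "z")

def Spec_cross_prod (v1 : String) (v2 : String) (third_axis : String) (out : String) : Prop := out = cross_prod_alt v1 v2 third_axis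
instance (v1 : String) (v2 : String) (third_axis : String) (out : String) : Decidable (Spec_cross_prod v1 v2 third_axis out) := by unfold Spec_cross_prod; infer_instance

-- ===== CLAIM (what is proved, stated in full; the proofs are below) =====
def Claim_equal_cross_prod : Prop := ∀ (v1 : String) (v2 : String) (third_axis : String), Dom_cross_prod v1 v2 third_axis → Pre_cross_prod v1 v2 third_axis → Spec_cross_prod v1 v2 third_axis (cross_prod v1 v2 third_axis)

-- ===== LEMMAS AND PROOFS =====

-- find "xyz" t is in {0,1,2} whenever it is not -1
lemma find_xyz_mem (t : String) (h : PySem.Str.find "xyz" t ≠ -1) :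
    PySem.Str.find "xyz" t = 0 ∨ PySem.Str.find "xyz" t = 1 ∨ PySem.Str.find "xyz" t = 2 := by
  have heq : PySem.Str.find "xyz" t = PySem.Chars.find "xyz".toList t.toList := PySem.Str.find_eq _ _
  have h0 : -1 ≤ PySem.Chars.find "xyz".toList t.toList := PySem.Chars.neg_one_le_find _ _
  have h3 : PySem.Chars.find "xyz".toList t.toList ≤ 3 := by
    have := PySem.Chars.find_le_length "xyz".toList t.toList
    simpa using this
  have hne3 : PySem.Chars.find "xyz".toList t.toList ≠ 3 := by
    intro he
    have hnn : 0 ≤ PySem.Chars.find "xyz".toList t.toList := by omega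
    have hsp := (PySem.Chars.find_spec hnn).1
    rw [he] at hsp
    have hnil : t.toList = [] := List.prefix_nil.mp (by simpa using hsp)
    rw [hnil, PySem.Chars.find_nil] at he
    exact absurd he (by decide)
  rw [heq] at h ⊢
  omega

theorem cross_prod_spec : Claim_equal_cross_prod := by
  intro v1 v2 ta _hdom hpre
  obtain ⟨h1, h2, h3⟩ := hpre
  show cross_prod v1 v2 ta = cross_prod_alt v1 v2 ta
  simp only [cross_prod, cross_prod_alt]
  simp only [List.mem_cons, List.not_mem_nil, or_false] at h1 h2
  generalize ((PySem.Str.pyGet? v1 0).getD ' ' == '-') = b1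
  generalize ((PySem.Str.pyGet? v2 0).getD ' ' == '-') = b2
  rcases find_xyz_mem ta h3 with hk | hk | hk <;> rw [hk] <;>
    rcases h1 with h1 | h1 | h1 <;> rw [h1] <;>
    rcases h2 with h2 | h2 | h2 <;> rw [h2] <;>
    cases b1 <;> cases b2 <;> (congr 1 <;> decide)
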